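-- pv_equiv track=rewrite | github.com/Yoo-Ju/Revisit | MSRA_proposal_wifi_log/code/code/sequencefeaturegenerator.py | leavelongest_samesupport
-- ===== SOURCE A (Python) =====
-- def is_subseq(x, y):
--     it = iter(y)
--     return all(c in it for c in x)
--
-- def recursivelyFindLongestSequence(aabaaba, new_list):
--
--     try:
--         for item in aabaaba:
--             testval = 0
--             for longt in new_list:
--                 testval += is_subseq(item, longt)
--
--             if testval == 0:
--                 new_list.append(item)
--
--         for item in new_list:
--             aabaaba.remove(item)
--
--
--         recursivelyFindLongestSequence(aabaaba, new_list)
--     except: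
--         pass
--
-- def leavelongest_samesupport(freq_seqs_sample):
--
-- 	freq_seqs_sample2 = {}
-- 	for kv in freq_seqs_sample:
-- 	    freq_seqs_sample2.setdefault((kv[1], kv[2]), []).append(kv[0])
--
-- 	freqfreqfreq = []
--
--
-- 	for k, v in freq_seqs_sample2.items():
-- 	    if len(v) > 1:
-- 	        v = sorted(v, key = len, reverse=True)
-- 	        new_list = []
-- 	        new_list.append(v[0])
-- 	        recursivelyFindLongestSequence(v, new_list)
-- 	        for item in new_list:
-- 	            freqfreqfreq.append(tuple((item, k)))
-- 	    else:
-- 	        freqfreqfreq.append(tuple((v[0], k)))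
--
-- 	freqfreqfreq = sorted(freqfreqfreq, key=lambda tup: tup[1], reverse=True)
--
-- 	return freqfreqfreq
-- ===== SOURCE B (Python) =====
-- def is_subseq(x, y):
--     it = iter(y)
--     return all(c in it for c in x)
--
-- def leavelongest_samesupport(freq_seqs_sample):
--     groups = {}
--     for kv in freq_seqs_sample:
--         groups.setdefault((kv[1], kv[2]), []).append(kv[0])
--     result = []
--     for k, v in groups.items():
--         if len(v) > 1:
--             kept = []
--             for item in sorted(v, key=len, reverse=True):
--                 if not any(is_subseq(item, c) for c in kept):
--                     kept.append(item)
--             result.extend((item, k) for item in kept)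
--         else:
--             result.append((v[0], k))
--     return sorted(result, key=lambda t: t[1], reverse=True)
-- ===== Notes on version B (the rewrite author's own statement) =====
-- stated objective: simpler
-- what changed: Replaced the mutating recursive helper (repeatedly building new_list, removing kept items from the group and recursing until an exception stops it) with a single forward pass over the length-sorted group that keeps each sequence not a subsequence of an already-kept one; grouping and final sort unchanged.
import Mathlib
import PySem

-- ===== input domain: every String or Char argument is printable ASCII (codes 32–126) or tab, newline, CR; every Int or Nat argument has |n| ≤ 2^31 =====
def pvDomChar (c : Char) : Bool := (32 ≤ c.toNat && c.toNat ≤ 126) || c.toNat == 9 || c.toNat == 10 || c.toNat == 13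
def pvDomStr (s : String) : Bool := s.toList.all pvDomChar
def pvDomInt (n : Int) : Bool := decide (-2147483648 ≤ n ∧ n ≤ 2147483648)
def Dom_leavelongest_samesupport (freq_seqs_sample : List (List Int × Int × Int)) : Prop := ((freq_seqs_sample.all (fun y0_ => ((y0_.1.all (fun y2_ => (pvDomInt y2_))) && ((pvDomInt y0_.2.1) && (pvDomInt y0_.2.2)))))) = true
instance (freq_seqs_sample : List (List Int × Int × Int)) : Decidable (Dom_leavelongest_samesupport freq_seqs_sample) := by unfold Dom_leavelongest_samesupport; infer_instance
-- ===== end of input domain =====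

-- B replaces A's mutating recursive fixed-point helper by a single forward pass that keeps
-- each sequence not a subsequence of an already-kept one (objective: simpler).

-- ===== PORT A =====
-- is_subseq(x, y): 'c in it' consumes the iterator past the first occurrence of c
def pvDropAfter (c : Int) : List Int → Option (List Int)
  | [] => none
  | y :: ys => if y = c then some ys else pvDropAfter c ys

def pvIsSubseq : List Int → List Int → Bool
  | [], _ => true
  | c :: cs, ys =>
    match pvDropAfter c ys with
    | none => false
    | some ys' => pvIsSubseq cs ys'

-- the grouping loop:  freq_seqs_sample2.setdefault((kv[1], kv[2]), []).append(kv[0])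
-- (identical in Source A and Source B, hence one shared helper)
def pvGroup (freq_seqs_sample : List (List Int × Int × Int)) : PySem.Dict (Int × Int) (List (List Int)) :=
  freq_seqs_sample.foldl (fun d kv => d.modify (kv.2.1, kv.2.2) [] (fun l => l ++ [kv.1])) PySem.Dict.empty

-- testval = sum of is_subseq(item, longt) over new_list
def pvTestval (item : List Int) (new_list : List (List Int)) : Nat :=
  new_list.foldl (fun t l => t + (if pvIsSubseq item l then 1 else 0)) 0

-- first loop of recursivelyFindLongestSequence: append item when testval == 0
def pvFirstLoop (aabaaba new_list : List (List Int)) : List (List Int) :=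
  aabaaba.foldl (fun nl item => if pvTestval item nl = 0 then nl ++ [item] else nl) new_list

-- second loop: aabaaba.remove(item) for item in new_list; none = ValueError (swallowed by the bare except)
def pvRemoveLoop : List (List Int) → List (List Int) → Option (List (List Int))
  | aab, [] => some aab
  | aab, item :: rest =>
    match PySem.List.remove? aab item with
    | none => none
    | some aab' => pvRemoveLoop aab' rest

-- the recursion; fuel models Python's recursion limit (RecursionError is swallowed by the bare
-- except, returning the mutated new_list — exactly what fuel 0 does)
def pvRecFind : Nat → List (List Int) → List (List Int) → List (List Int)
  | 0, _, new_list => new_list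
  | fuel + 1, aabaaba, new_list =>
    let nl := pvFirstLoop aabaaba new_list
    match pvRemoveLoop aabaaba nl with
    | none => nl
    | some aab' => pvRecFind fuel aab' nl

def leavelongest_samesupport (freq_seqs_sample : List (List Int × Int × Int)) : List (List Int × (Int × Int)) :=
  let freq_seqs_sample2 := pvGroup freq_seqs_sample
  let freqfreqfreq := freq_seqs_sample2.items.foldl (fun acc kv =>
    if kv.2.length > 1 then
      let v := PySem.List.sorted kv.2 (fun l => l.length) true
      -- new_list = [v[0]] then the recursive helper; v nonempty here since len(v) > 1
      let new_list := pvRecFind (v.length + 1) v [v.headD []]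
      acc ++ new_list.map (fun item => (item, kv.1))
    else acc ++ [(kv.2.headD [], kv.1)]) []   -- v[0]; group lists are nonempty by construction
  PySem.List.sorted2 freqfreqfreq (fun t => t.2.1) (fun t => t.2.2) true

-- ===== PORT B =====
-- one forward pass over the length-sorted group: keep item unless it is a subsequence of a kept one
def pvKeepMaximal (s : List (List Int)) : List (List Int) :=
  s.foldl (fun kept item => if !(kept.any (fun c => pvIsSubseq item c)) then kept ++ [item] else kept) []

def leavelongest_samesupport_alt (freq_seqs_sample : List (List Int × Int × Int)) : List (List Int × (Int × Int)) :=
  let groups := pvGroup freq_seqs_sample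
  let result := groups.items.flatMap (fun kv =>
    if kv.2.length > 1 then
      (pvKeepMaximal (PySem.List.sorted kv.2 (fun l => l.length) true)).map (fun item => (item, kv.1))
    else [(kv.2.headD [], kv.1)])   -- v[0]; group lists are nonempty by construction
  PySem.List.sorted2 result (fun t => t.2.1) (fun t => t.2.2) true

-- ===== PRECONDITION & SPEC =====
def Spec_leavelongest_samesupport (freq_seqs_sample : List (List Int × Int × Int)) (out : List (List Int × (Int × Int))) : Prop := out = leavelongest_samesupport_alt freq_seqs_sample
instance (freq_seqs_sample : List (List Int × Int × Int)) (out : List (List Int × (Int × Int))) : Decidable (Spec_leavelongest_samesupport freq_seqs_sample out) := by unfold Spec_leavelongest_samesupport; infer_instance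

-- ===== CLAIM (what is proved, stated in full; the proofs are below) =====
def Claim_equal_leavelongest_samesupport : Prop := ∀ (freq_seqs_sample : List (List Int × Int × Int)), Dom_leavelongest_samesupport freq_seqs_sample → Spec_leavelongest_samesupport freq_seqs_sample (leavelongest_samesupport freq_seqs_sample)

-- ===== LEMMAS AND PROOFS =====

theorem pvIsSubseq_refl (x : List Int) : pvIsSubseq x x = true := by
  induction x with
  | nil => rfl
  | cons c cs ih => simp [pvIsSubseq, pvDropAfter, ih]

theorem pvTestval_eq_countP (item : List Int) (nl : List (List Int)) :
    pvTestval item nl = nl.countP (fun l => pvIsSubseq item l) := by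
  unfold pvTestval
  rw [PySem.List.foldl_add_nat]
  induction nl with
  | nil => rfl
  | cons h t ih =>
    simp only [List.map_cons, List.sum_cons, List.countP_cons]
    by_cases hp : pvIsSubseq item h <;> simp [hp] <;> omega

-- A's fold step equals B's fold step
theorem step_eq :
    (fun (nl : List (List Int)) item => if pvTestval item nl = 0 then nl ++ [item] else nl)
      = (fun kept item => if !(kept.any (fun c => pvIsSubseq item c)) then kept ++ [item] else kept) := by
  funext nl item
  rw [pvTestval_eq_countP]
  rcases h : nl.any (fun c => pvIsSubseq item c) with _ | _
  · simp only [List.any_eq_false] at h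
    rw [List.countP_eq_zero.mpr (by simpa using h)]
    simp
  · have : nl.countP (fun l => pvIsSubseq item l) ≠ 0 := by
      rcases List.any_eq_true.mp h with ⟨c, hc, hpc⟩
      exact fun h0 => (List.countP_eq_zero.mp h0) c hc hpc
    simp [this]

theorem removeLoop_subset {aab nl aab' : List (List Int)}
    (h : pvRemoveLoop aab nl = some aab') : ∀ x ∈ aab', x ∈ aab := by
  induction nl generalizing aab with
  | nil => cases h; exact fun x hx => hx
  | cons i rest ih =>
    unfold pvRemoveLoop at h
    rcases hr : PySem.List.remove? aab i with _ | aab2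
    · rw [hr] at h; cases h
    · rw [hr] at h
      have hi : i ∈ aab := by
        by_contra hni
        rw [(PySem.List.remove?_eq_none_iff aab i).mpr hni] at hr; cases hr
      rw [PySem.List.remove?_eq_some_erase aab i hi] at hr
      cases hr
      exact fun x hx => List.mem_of_mem_erase (ih h x hx)

theorem firstLoop_fixed {aab nl : List (List Int)}
    (h : ∀ x ∈ aab, ∃ k ∈ nl, pvIsSubseq x k = true) : pvFirstLoop aab nl = nl := by
  unfold pvFirstLoop
  induction aab with
  | nil => rfl
  | cons x t ih =>
    have hx : pvTestval x nl ≠ 0 := by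
      rw [pvTestval_eq_countP]
      rcases h x (List.mem_cons_self) with ⟨k, hk, hsk⟩
      exact fun h0 => (List.countP_eq_zero.mp h0) k hk hsk
    simp only [List.foldl_cons, if_neg hx]
    exact ih (fun y hy => h y (List.mem_cons_of_mem _ hy))

theorem recFind_fixed (fuel : Nat) (aab nl : List (List Int))
    (h : ∀ x ∈ aab, ∃ k ∈ nl, pvIsSubseq x k = true) : pvRecFind fuel aab nl = nl := by
  induction fuel generalizing aab with
  | zero => rfl
  | succ f ih =>
    unfold pvRecFind
    rw [firstLoop_fixed h]
    rcases hr : pvRemoveLoop aab nl with _ | aab'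
    · simp only [hr]
    · simp only [hr]
      exact ih aab' (fun x hx => h x (removeLoop_subset hr x hx))

theorem keepMaximal_extends (s : List (List Int)) (kept : List (List Int)) :
    ∀ y ∈ kept, y ∈ s.foldl (fun kept item => if !(kept.any (fun c => pvIsSubseq item c)) then kept ++ [item] else kept) kept := by
  induction s generalizing kept with
  | nil => exact fun y hy => hy
  | cons x t ih =>
    intro y hy
    simp only [List.foldl_cons]
    split
    · exact ih _ y (List.mem_append_left _ hy)
    · exact ih _ y hy

theorem keepMaximal_covers (s : List (List Int)) (kept : List (List Int)) :
    ∀ x ∈ s, ∃ k ∈ s.foldl (fun kept item => if !(kept.any (fun c => pvIsSubseq item c)) then kept ++ [item] else kept) kept, pvIsSubseq x k = true := by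
  induction s generalizing kept with
  | nil => intro x hx; cases hx
  | cons a t ih =>
    intro x hx
    simp only [List.foldl_cons]
    by_cases ha : (kept.any (fun c => pvIsSubseq a c)) = true
    · rw [if_neg (by simp [ha])]
      rcases List.mem_cons.mp hx with rfl | hx
      · rcases List.any_eq_true.mp ha with ⟨c, hc, hpc⟩
        exact ⟨c, keepMaximal_extends t kept c hc, hpc⟩
      · exact ih kept x hx
    · rw [if_pos (by simpa using ha)]
      rcases List.mem_cons.mp hx with rfl | hx
      · exact ⟨x, keepMaximal_extends t _ x (by simp), pvIsSubseq_refl x⟩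
      · exact ih _ x hx

theorem per_group (h : List Int) (t : List (List Int)) :
    pvRecFind ((h :: t).length + 1) (h :: t) [h] = pvKeepMaximal (h :: t) := by
  have hfl : pvFirstLoop (h :: t) [h] = pvKeepMaximal (h :: t) := by
    unfold pvFirstLoop pvKeepMaximal
    rw [step_eq]
    simp [pvIsSubseq_refl]
  have hcov : ∀ x ∈ h :: t, ∃ k ∈ pvKeepMaximal (h :: t), pvIsSubseq x k = true :=
    keepMaximal_covers (h :: t) []
  show pvRecFind (t.length + 1 + 1) (h :: t) [h] = pvKeepMaximal (h :: t)
  unfold pvRecFind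
  rcases hr : pvRemoveLoop (h :: t) (pvKeepMaximal (h :: t)) with _ | aab'
  · simp only [hfl, hr]
  · simp only [hfl, hr]
    exact recFind_fixed _ aab' _ (fun x hx => hcov x (removeLoop_subset hr x hx))

-- ===== VERDICT (by name: the statement is the Claim_ definition above) =====
theorem branch_eq (kv : (Int × Int) × List (List Int)) :
    (if kv.2.length > 1 then
      let v := PySem.List.sorted kv.2 (fun l => l.length) true
      let new_list := pvRecFind (v.length + 1) v [v.headD []]
      new_list.map (fun item => (item, kv.1))
    else [(kv.2.headD [], kv.1)])
    = (if kv.2.length > 1 then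
        (pvKeepMaximal (PySem.List.sorted kv.2 (fun l => l.length) true)).map (fun item => (item, kv.1))
      else [(kv.2.headD [], kv.1)]) := by
  by_cases hl : kv.2.length > 1
  · simp only [if_pos hl]
    rcases hs : PySem.List.sorted kv.2 (fun l => l.length) true with _ | ⟨hd, tl⟩
    · exfalso
      rw [PySem.List.sorted_eq_nil_iff] at hs
      simp [hs] at hl
    · simp only [List.headD_cons]
      rw [per_group hd tl]
  · simp [hl]

theorem leavelongest_samesupport_spec : Claim_equal_leavelongest_samesupport := by
  intro freq_seqs_sample _
  show leavelongest_samesupport freq_seqs_sample = leavelongest_samesupport_alt freq_seqs_sample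
  unfold leavelongest_samesupport leavelongest_samesupport_alt
  have hstep : (fun (acc : List (List Int × (Int × Int))) (kv : (Int × Int) × List (List Int)) =>
      if kv.2.length > 1 then
        let v := PySem.List.sorted kv.2 (fun l => l.length) true
        let new_list := pvRecFind (v.length + 1) v [v.headD []]
        acc ++ new_list.map (fun item => (item, kv.1))
      else acc ++ [(kv.2.headD [], kv.1)])
      = (fun acc kv => acc ++ (if kv.2.length > 1 then
          (pvKeepMaximal (PySem.List.sorted kv.2 (fun l => l.length) true)).map (fun item => (item, kv.1))
        else [(kv.2.headD [], kv.1)])) := by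
    funext acc kv
    rw [← branch_eq kv]
    by_cases hl : kv.2.length > 1 <;> simp [hl]
  simp only [hstep, PySem.List.foldl_append_eq_flatMap, List.nil_append]
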